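-- pv_equiv track=rewrite | github.com/Portulinas/istKillMe | fp/Sopa de letras/acabado.py | cadeia_noroeste
-- ===== SOURCE A (Python) =====
-- def coord_linha(c):
--     """
--     coord_linha : coordenada --> N0
--     coord_linha(c) tem como valor a linha da coordenada.
--     """
--     return c[0]
--
-- def coord_coluna(c):
--     """
--     coord_coluna : coordenada --> N0
--     coord_coluna(c) tem como valor a coluna da coordenada.
--     """
--     return c[1]
--
-- def grelha_nr_linhas(g):
--     """
--     grelha_nr_linhas : grelha --> N
--     grelha_nr_linhas(g) devolve o numero de linhas da grelha g.
--     """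
--     return len(g)
--
-- def grelha_nr_colunas(g):
--     """
--     grelha_nr_colunas : grelha --> N
--     grelha_nr_colunas(g) devolve o numero de colunas da grelha g.
--     """
--     return len(g[0])
--
-- def grelha_elemento(g,l,c):
--     """
--     grelha_elementos : grelha x N0 x N0 --> carater
--     grelha_elementos(g,l,c) devolve o carater que esta na posicao(l,c) da grelha g.
--     """
--     if l > len(g)-1 or l < 0:
--         raise ValueError('grelha_elemento: argumentos invalidos')
--     if c > len(g[0])-1 or c < 0:
--         raise ValueError('grelha_elemento: argumentos invalidos')
--     return g[l][c]
--
-- def cadeia_noroeste(g,c):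
--     """
--     cadeia_noroeste : grelha x coordenada --> string
--     cadeia_noroeste(g, c) devolve a cadeia de caracteres que corresponde a linha
--     definida segundo a direcao 'NW' dada pela coordenada c, e que inclui a
--     posicao dada pela mesma coordenada.
--     """
--     lin = coord_linha(c)
--     col = coord_coluna(c)
--     cad = ''
--     while lin != grelha_nr_linhas(g) - 1  and col != grelha_nr_colunas(g)- 1:
--         lin = lin + 1
--         col = col + 1
--     while lin != -1 and col != -1:
--         cad = cad + grelha_elemento(g,lin,col)
--         lin = lin - 1
--         col = col - 1
--     return cad
-- ===== SOURCE B (Python) =====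
-- def grelha_elemento(g, l, c):
--     """Module accessor reused unchanged from the original module."""
--     if l > len(g)-1 or l < 0:
--         raise ValueError('grelha_elemento: argumentos invalidos')
--     if c > len(g[0])-1 or c < 0:
--         raise ValueError('grelha_elemento: argumentos invalidos')
--     return g[l][c]
--
-- def cadeia_noroeste(g, c):
--     """The SE end of the NW word through c is c shifted by the closed-form
--     offset k = min(nr-1-lin, nc-1-col) (no walking loop); the word is then
--     collected NW-wards in one pass and joined (no quadratic concatenation)."""
--     lin, col = c
--     k = min(len(g) - 1 - lin, len(g[0]) - 1 - col)
--     l, m = lin + k, col + k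
--     out = []
--     while l != -1 and m != -1:
--         out.append(grelha_elemento(g, l, m))
--         l -= 1
--         m -= 1
--     return ''.join(out)
-- ===== Notes on version B (the rewrite author's own statement) =====
-- stated objective: simpler
-- what changed: A finds the SE end of the diagonal by walking a while-loop and then builds the string by repeated concatenation in a second while-loop; B computes the SE-end offset in closed form (k = min(nr-1-lin, nc-1-col)), reuses the module accessor grelha_elemento, and collects the cells in one pass joined at the end.
-- outside the precondition, e.g. on cadeia_noroeste([], (-1, 0)): A returns '', B raises IndexError; on cadeia_noroeste([[]], (5, -1)): A returns '', B raises ValueError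
import Mathlib
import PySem

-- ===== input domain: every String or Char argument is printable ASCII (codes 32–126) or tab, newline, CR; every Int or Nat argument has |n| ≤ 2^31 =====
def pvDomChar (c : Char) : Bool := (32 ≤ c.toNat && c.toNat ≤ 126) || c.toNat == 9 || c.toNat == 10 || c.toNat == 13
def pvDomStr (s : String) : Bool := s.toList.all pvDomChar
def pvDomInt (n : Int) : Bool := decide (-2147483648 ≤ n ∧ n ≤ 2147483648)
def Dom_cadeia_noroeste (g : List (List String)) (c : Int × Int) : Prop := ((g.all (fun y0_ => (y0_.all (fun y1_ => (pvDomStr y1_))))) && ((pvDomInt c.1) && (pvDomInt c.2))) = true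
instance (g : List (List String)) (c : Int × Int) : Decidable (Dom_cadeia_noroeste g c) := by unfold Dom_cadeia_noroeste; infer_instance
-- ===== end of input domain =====

-- B replaces A's corner-finding while-loop by a closed-form offset and its
-- concatenating while-loop by one collect-and-join pass (objective: simpler).

-- ===== PORT A =====
-- grelha_elemento: none = the ValueError raised by the explicit checks, or the
-- IndexError of g[l][c] on a too-short row (both excluded by Pre_).
def pvElem (g : List (List String)) (l c : Int) : Option String :=
  if l > (g.length : Int) - 1 ∨ l < 0 then none
  else if c > ((g.headD []).length : Int) - 1 ∨ c < 0 then none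
  else PySem.List.pyGet? (PySem.List.pyGetD g l []) c

-- first while-loop of A (walk SE until a far edge is hit); fueled: inside Pre_
-- the fuel passed below strictly exceeds the number of Python iterations.
def pvWalk (nl nc : Int) : Nat → Int → Int → Int × Int
  | 0, lin, col => (lin, col)
  | f + 1, lin, col =>
      if lin ≠ nl - 1 ∧ col ≠ nc - 1 then pvWalk nl nc f (lin + 1) (col + 1)
      else (lin, col)

-- second while-loop of A (walk NW to the near edge, concatenating); the
-- accumulator is the character list of A's string cad; .getD "" is only
-- reached where Python raises (excluded by Pre_).
def pvCollect (g : List (List String)) : Nat → Int → Int → List Char → List Char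
  | 0, _, _, cad => cad
  | f + 1, lin, col, cad =>
      if lin ≠ -1 ∧ col ≠ -1 then
        pvCollect g f (lin - 1) (col - 1) (cad ++ ((pvElem g lin col).getD "").toList)
      else cad

def cadeia_noroeste (g : List (List String)) (c : Int × Int) : String :=
  let lin := c.1
  let col := c.2
  let nl : Int := g.length
  let nc : Int := (g.headD []).length
  let p := pvWalk nl nc ((max 0 (nl - 1 - lin)).toNat + (max 0 (nc - 1 - col)).toNat + 1) lin col
  String.ofList (pvCollect g (g.length + 1) p.1 p.2 [])

-- ===== PORT B =====
-- Source B's collecting while-loop (fueled like A's; Source B's own grelha_elemento is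
-- the identical module accessor, so its port pvElem is shared with A's side;
-- .getD "" is only reached where Python raises, excluded by Pre_).
def pvRead (g : List (List String)) : Nat → Int → Int → List String → List String
  | 0, _, _, out => out
  | f + 1, l, m, out =>
      if l ≠ -1 ∧ m ≠ -1 then pvRead g f (l - 1) (m - 1) (out ++ [(pvElem g l m).getD ""])
      else out

def cadeia_noroeste_alt (g : List (List String)) (c : Int × Int) : String :=
  let lin := c.1
  let col := c.2
  let k := min ((g.length : Int) - 1 - lin) (((g.headD []).length : Int) - 1 - col)
  PySem.Str.join "" (pvRead g (g.length + 1) (lin + k) (col + k) [])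

-- ===== PRECONDITION & SPEC =====
-- Pre_ excludes the inputs on which A raises or never terminates, and two
-- accidental corners where A still returns '' for a coordinate outside the
-- grid (an empty grid with row -1, and a beyond-last-row coordinate with
-- column ≤ -1 on a zero-width grid) on which the natural B raises through its
-- validating accessor: inside the claim are grids with both coordinates
-- ≤ the far edges whose walked corner either exits at once (st = -1 or
-- st-diff = -1) or starts an in-bounds diagonal over long-enough rows.
def Pre_cadeia_noroeste (g : List (List String)) (c : Int × Int) : Prop :=
  let lin := c.1
  let col := c.2
  let nl : Int := g.length
  let nc : Int := (g.headD []).length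
  let diff := lin - col
  let st := min (nl - 1) (nc - 1 + diff)
  let en := max 0 diff
  g ≠ [] ∧ lin ≤ nl - 1 ∧ col ≤ nc - 1 ∧
    (st = -1 ∨ st - diff = -1 ∨
      (0 ≤ st ∧ diff ≤ st ∧
        ∀ r : Nat, r < g.length → en ≤ (r : Int) → (r : Int) ≤ st →
          (r : Int) - diff < ((g.getD r []).length : Int)))
instance (g : List (List String)) (c : Int × Int) : Decidable (Pre_cadeia_noroeste g c) := by
  unfold Pre_cadeia_noroeste; infer_instance

def pvWitness_cadeia_noroeste : List (List String) × (Int × Int) := ([["a", "b"], ["c", "d"]], (0, 1))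

def Spec_cadeia_noroeste (g : List (List String)) (c : Int × Int) (out : String) : Prop := out = cadeia_noroeste_alt g c
instance (g : List (List String)) (c : Int × Int) (out : String) : Decidable (Spec_cadeia_noroeste g c out) := by unfold Spec_cadeia_noroeste; infer_instance

-- ===== CLAIM (what is proved, stated in full; the proofs are below) =====
def Claim_equal_cadeia_noroeste : Prop := ∀ (g : List (List String)) (c : Int × Int), Dom_cadeia_noroeste g c → Pre_cadeia_noroeste g c → Spec_cadeia_noroeste g c (cadeia_noroeste g c)

-- ===== LEMMAS AND PROOFS =====

-- the number of iterations of A's first loop, as an Int (≥ 0 when it terminates)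
def pvSteps (nl nc lin col : Int) : Int :=
  if lin ≤ nl - 1 ∧ col ≤ nc - 1 then min (nl - 1 - lin) (nc - 1 - col)
  else if lin ≤ nl - 1 then nl - 1 - lin else nc - 1 - col

lemma pvWalk_eq (nl nc : Int) :
    ∀ (f : Nat) (lin col : Int), (lin ≤ nl - 1 ∨ col ≤ nc - 1) →
      (pvSteps nl nc lin col).toNat < f →
      pvWalk nl nc f lin col = (lin + pvSteps nl nc lin col, col + pvSteps nl nc lin col) := by
  intro f
  induction f with
  | zero => intro lin col _ hf; omega
  | succ f ih =>
      intro lin col hterm hf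
      by_cases hg : lin ≠ nl - 1 ∧ col ≠ nc - 1
      · have hterm' : lin + 1 ≤ nl - 1 ∨ col + 1 ≤ nc - 1 := by
          rcases hterm with h | h <;> [left; right] <;> omega
        have hs : pvSteps nl nc lin col = pvSteps nl nc (lin + 1) (col + 1) + 1 := by
          unfold pvSteps; split_ifs <;> omega
        have hf' : (pvSteps nl nc (lin + 1) (col + 1)).toNat < f := by
          have h0 : 0 ≤ pvSteps nl nc (lin + 1) (col + 1) := by
            unfold pvSteps; split_ifs <;> omega
          omega
        rw [pvWalk, if_pos hg, ih (lin + 1) (col + 1) hterm' hf', hs]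
        simp only [Prod.mk.injEq]
        omega
      · have hs : pvSteps nl nc lin col = 0 := by
          unfold pvSteps; split_ifs <;> omega
        rw [pvWalk, if_neg hg, hs]
        simp

lemma pvCollect_eq (g : List (List String)) (diff : Int) :
    ∀ (f : Nat) (L : Int) (cad : List Char),
      -1 ≤ L → -1 ≤ L - diff → L ≤ (g.length : Int) - 1 →
      L - diff ≤ ((g.headD []).length : Int) - 1 →
      (L + 1).toNat < f →
      (∀ r : Nat, r < g.length → max 0 diff ≤ (r : Int) → (r : Int) ≤ L →
          (r : Int) - diff < ((g.getD r []).length : Int)) →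
      pvCollect g f L (L - diff) cad =
        cad ++ ((PySem.List.pyRange L (max 0 diff - 1) (-1)).map
          (fun r => ((PySem.List.pyGet? (PySem.List.pyGetD g r []) (r - diff)).getD "").toList)).flatten := by
  intro f
  induction f with
  | zero => intro L cad h0 h1 h2 h3 hf hrow; omega
  | succ f ih =>
      intro L cad h0 h1 h2 h3 hf hrow
      by_cases hg : L ≠ -1 ∧ L - diff ≠ -1
      · have hL0 : 0 ≤ L := by omega
        have hC0 : 0 ≤ L - diff := by omega
        have he : pvElem g L (L - diff) =
            PySem.List.pyGet? (PySem.List.pyGetD g L []) (L - diff) := by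
          unfold pvElem
          rw [if_neg (by omega), if_neg (by omega)]
        rw [pvCollect, if_pos hg,
          PySem.List.pyRange_neg_one_cons (by omega : max 0 diff - 1 < L),
          show L - diff - 1 = L - 1 - diff by ring,
          ih (L - 1) _ (by omega) (by omega) (by omega) (by omega) (by omega)
            (fun r hr h1r h2r => hrow r hr h1r (by omega))]
        simp [he, List.append_assoc]
      · rw [pvCollect, if_neg hg,
          PySem.List.pyRange_neg_one_eq_nil (by omega : L ≤ max 0 diff - 1)]
        simp

lemma pvIntersperse_nil_flatten (l : List (List Char)) :
    (List.intersperse ([] : List Char) l).flatten = l.flatten := by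
  induction l with
  | nil => rfl
  | cons a t ih =>
      cases t with
      | nil => rfl
      | cons b u => simp_all [List.intersperse]

lemma pvJoin_empty_eq (parts : List String) :
    PySem.Str.join "" parts = String.ofList ((parts.map String.toList).flatten) := by
  rw [← String.ofList_toList (s := PySem.Str.join "" parts), PySem.Str.toList_join]
  congr 1
  simpa [PySem.Chars.join, List.intercalate] using
    pvIntersperse_nil_flatten (parts.map String.toList)

lemma pvRead_eq (g : List (List String)) (diff : Int) :
    ∀ (f : Nat) (L : Int) (out : List String),
      -1 ≤ L → -1 ≤ L - diff → (L + 1).toNat < f →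
      pvRead g f L (L - diff) out =
        out ++ (PySem.List.pyRange L (max 0 diff - 1) (-1)).map
          (fun r => (pvElem g r (r - diff)).getD "") := by
  intro f
  induction f with
  | zero => intro L out h0 h1 hf; omega
  | succ f ih =>
      intro L out h0 h1 hf
      by_cases hg : L ≠ -1 ∧ L - diff ≠ -1
      · rw [pvRead, if_pos hg,
          PySem.List.pyRange_neg_one_cons (by omega : max 0 diff - 1 < L),
          show L - diff - 1 = L - 1 - diff by ring,
          ih (L - 1) _ (by omega) (by omega) (by omega)]
        simp [List.append_assoc]
      · rw [pvRead, if_neg hg,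
          PySem.List.pyRange_neg_one_eq_nil (by omega : L ≤ max 0 diff - 1)]
        simp

-- ===== VERDICT (by name: the statement is the Claim_ definition above) =====
theorem cadeia_noroeste_spec : Claim_equal_cadeia_noroeste := by
  unfold Claim_equal_cadeia_noroeste
  intro g c _hdom hpre
  obtain ⟨lin, col⟩ := c
  unfold Pre_cadeia_noroeste at hpre
  simp only at hpre
  obtain ⟨hne, hlin, hcol, hdisj⟩ := hpre
  have hnl : 1 ≤ (g.length : Int) := by
    have := List.length_pos_iff.mpr hne
    omega
  unfold Spec_cadeia_noroeste cadeia_noroeste cadeia_noroeste_alt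
  simp only
  have hfuel : (pvSteps (g.length : Int) ((g.headD []).length : Int) lin col).toNat <
      (max 0 ((g.length : Int) - 1 - lin)).toNat +
        (max 0 (((g.headD []).length : Int) - 1 - col)).toNat + 1 := by
    unfold pvSteps; split_ifs <;> omega
  rw [pvWalk_eq _ _ _ lin col (Or.inl hlin) hfuel]
  have hs : pvSteps (g.length : Int) ((g.headD []).length : Int) lin col =
      min ((g.length : Int) - 1 - lin) (((g.headD []).length : Int) - 1 - col) := by
    unfold pvSteps; rw [if_pos ⟨hlin, hcol⟩]
  rw [hs]
  -- A's walked corner and B's closed-form corner are the same point (st, st - diff)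
  rw [show lin + min ((g.length : Int) - 1 - lin) (((g.headD []).length : Int) - 1 - col)
      = min ((g.length : Int) - 1) (((g.headD []).length : Int) - 1 + (lin - col)) by omega,
    show col + min ((g.length : Int) - 1 - lin) (((g.headD []).length : Int) - 1 - col)
      = min ((g.length : Int) - 1) (((g.headD []).length : Int) - 1 + (lin - col)) - (lin - col) by omega]
  rcases hdisj with hL | hC | ⟨hst0, hdst, hrow⟩
  · -- corner row is already -1: both loops exit at once and both sides are ''
    rw [pvCollect, if_neg (by omega), pvRead, if_neg (by omega)]
    rfl
  · -- corner column is already -1: both loops exit at once and both sides are ''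
    rw [pvCollect, if_neg (by omega), pvRead, if_neg (by omega)]
    rfl
  · -- main case: both sides walk the diagonal from row st down to row max 0 diff
    rw [pvCollect_eq g (lin - col) (g.length + 1)
        (min ((g.length : Int) - 1) (((g.headD []).length : Int) - 1 + (lin - col)))
        [] (by omega) (by omega) (by omega) (by omega) (by omega)
        (fun r hr h1r h2r => hrow r hr h1r h2r),
      pvRead_eq g (lin - col) (g.length + 1)
        (min ((g.length : Int) - 1) (((g.headD []).length : Int) - 1 + (lin - col)))
        [] (by omega) (by omega) (by omega),
      pvJoin_empty_eq]
    rw [List.nil_append, List.nil_append, List.map_map]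
    congr 1
    refine congrArg List.flatten (List.map_congr_left ?_)
    intro r hr
    rw [PySem.List.mem_pyRange_neg_one] at hr
    have hElem : pvElem g r (r - (lin - col)) =
        PySem.List.pyGet? (PySem.List.pyGetD g r []) (r - (lin - col)) := by
      unfold pvElem
      rw [if_neg (by omega), if_neg (by omega)]
    simp [Function.comp, hElem]
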